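-- pv_equiv track=rewrite | github.com/bartwill452-cmd/soldi-website | soldi-api/sources/polymarket.py | _find_moneyline_market
-- ===== SOURCE A (Python) =====
-- from typing import Any, Dict, List, Optional, Tuple
--
-- def _find_moneyline_market(event_markets: list) -> Optional[dict]:
--     """Find the moneyline market from a list of markets.
--
--     Uses sportsMarketType='moneyline' first, falls back to question parsing.
--     """
--     # Prefer sportsMarketType field (reliable for sports events)
--     for mkt in event_markets:
--         if mkt.get("sportsMarketType") == "moneyline":
--             return mkt
--
--     # Fallback: parse question text
--     for mkt in event_markets:
--         question = (mkt.get("question", "") or "").lower()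
--         group_title = (mkt.get("groupItemTitle", "") or "").lower()
--         # Skip spread and total markets
--         if "spread" in question or "spread" in group_title:
--             continue
--         if "o/u" in question or "over" in question or "under" in question:
--             continue
--         if "total" in question:
--             continue
--         # This is likely the moneyline market
--         return mkt
--     # Fallback: return first market
--     return event_markets[0] if event_markets else None
-- ===== SOURCE B (Python) =====
-- from typing import Optional
--
-- def _find_moneyline_market(event_markets: list) -> Optional[dict]:
--     """Rank each market (0 = moneyline, 1 = plain, 2 = spread/total/over-under)
--     and return the first market of minimal rank (stable minimum)."""
--     def _rank(mkt):
--         if mkt.get("sportsMarketType") == "moneyline":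
--             return 0
--         question = (mkt.get("question", "") or "").lower()
--         group_title = (mkt.get("groupItemTitle", "") or "").lower()
--         bad = ("spread" in question or "spread" in group_title
--                or "o/u" in question or "over" in question
--                or "under" in question or "total" in question)
--         return 2 if bad else 1
--     best = None
--     best_rank = 3
--     for mkt in event_markets:
--         r = _rank(mkt)
--         if r < best_rank:
--             best, best_rank = mkt, r
--     return best
-- ===== Notes on version B (the rewrite author's own statement) =====
-- stated objective: alternative
-- what changed: Replaced A's two staged scans plus head fallback by a rank-and-select algorithm: each market is classified once (0 moneyline, 1 plain, 2 spread/total/over-under) and the first market of minimal rank is returned via a stable-minimum fold.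
import Mathlib
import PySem

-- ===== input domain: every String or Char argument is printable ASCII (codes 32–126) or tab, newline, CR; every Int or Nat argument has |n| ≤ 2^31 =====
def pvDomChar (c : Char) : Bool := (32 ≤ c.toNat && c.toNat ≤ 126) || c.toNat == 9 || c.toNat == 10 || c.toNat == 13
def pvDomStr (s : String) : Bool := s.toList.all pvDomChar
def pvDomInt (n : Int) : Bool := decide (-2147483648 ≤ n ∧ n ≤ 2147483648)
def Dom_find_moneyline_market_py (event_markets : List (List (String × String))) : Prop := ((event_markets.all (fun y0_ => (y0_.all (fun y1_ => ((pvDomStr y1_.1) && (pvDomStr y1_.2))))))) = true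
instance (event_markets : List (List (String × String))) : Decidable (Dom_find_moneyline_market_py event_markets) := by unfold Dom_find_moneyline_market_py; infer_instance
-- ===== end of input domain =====

-- B replaces A's staged scans by classifying every market with a rank and taking the first market of minimal rank (objective: alternative algorithm, same return value).

-- ===== PORT A =====
-- mkt.get(k) on the dict-as-association-list (first match)
def pvGet (mkt : List (String × String)) (k : String) : Option String :=
  (mkt.find? (fun p => p.1 == k)).map (·.2)

-- mkt.get("sportsMarketType") == "moneyline"
def pvIsML (mkt : List (String × String)) : Bool :=
  pvGet mkt "sportsMarketType" == some "moneyline"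

-- the spread/total/over-under filter of the fallback scan ((mkt.get(...,"") or "").lower(); empty string is falsy so `or ""` is the default)
def pvSkip (mkt : List (String × String)) : Bool :=
  let question := PySem.Str.lower ((pvGet mkt "question").getD "")
  let group_title := PySem.Str.lower ((pvGet mkt "groupItemTitle").getD "")
  PySem.Str.isIn "spread" question || PySem.Str.isIn "spread" group_title ||
  PySem.Str.isIn "o/u" question || PySem.Str.isIn "over" question ||
  PySem.Str.isIn "under" question || PySem.Str.isIn "total" question

-- first for-loop: return the first market with sportsMarketType == "moneyline"
def pvPass1 : List (List (String × String)) → Option (List (String × String))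
  | [] => none
  | m :: rest => if pvIsML m then some m else pvPass1 rest

-- second for-loop: skip spread/total/over-under markets, return the first remaining
def pvPass2 : List (List (String × String)) → Option (List (String × String))
  | [] => none
  | m :: rest => if pvSkip m then pvPass2 rest else some m

def find_moneyline_market_py (event_markets : List (List (String × String))) : Option (List (String × String)) :=
  match pvPass1 event_markets with
  | some m => some m
  | none =>
    match pvPass2 event_markets with
    | some m => some m
    | none =>
      -- return event_markets[0] if event_markets else None
      match event_markets with
      | [] => none
      | m :: _ => some m

-- ===== PORT B =====
-- Source B's _rank: 0 = moneyline, 2 = spread/total/over-under, 1 = everything else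
def pvRank (mkt : List (String × String)) : Nat :=
  if (mkt.find? (fun p => p.1 == "sportsMarketType")).map (·.2) == some "moneyline" then 0
  else
    let question := PySem.Str.lower (((mkt.find? (fun p => p.1 == "question")).map (·.2)).getD "")
    let group_title := PySem.Str.lower (((mkt.find? (fun p => p.1 == "groupItemTitle")).map (·.2)).getD "")
    let bad := PySem.Str.isIn "spread" question || PySem.Str.isIn "spread" group_title ||
      PySem.Str.isIn "o/u" question || PySem.Str.isIn "over" question ||
      PySem.Str.isIn "under" question || PySem.Str.isIn "total" question
    if bad then 2 else 1

-- the loop body: keep (best, best_rank), replace on a strictly smaller rank (stable minimum)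
def pvStepB (acc : Option (List (String × String)) × Nat) (mkt : List (String × String)) :
    Option (List (String × String)) × Nat :=
  let r := pvRank mkt
  if r < acc.2 then (some mkt, r) else acc

def find_moneyline_market_py_alt (event_markets : List (List (String × String))) : Option (List (String × String)) :=
  (event_markets.foldl pvStepB (none, 3)).1

-- ===== PRECONDITION & SPEC =====
def Spec_find_moneyline_market_py (event_markets : List (List (String × String))) (out : Option (List (String × String))) : Prop := out = find_moneyline_market_py_alt event_markets
instance (event_markets : List (List (String × String))) (out : Option (List (String × String))) : Decidable (Spec_find_moneyline_market_py event_markets out) := by unfold Spec_find_moneyline_market_py; infer_instance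

-- ===== CLAIM =====
def Claim_equal_find_moneyline_market_py : Prop := ∀ (event_markets : List (List (String × String))), Dom_find_moneyline_market_py event_markets → Spec_find_moneyline_market_py event_markets (find_moneyline_market_py event_markets)

-- ===== LEMMAS AND PROOFS =====

-- rank characterisation against A's two predicates
lemma pvRank_eq_zero_iff (m : List (String × String)) : pvRank m = 0 ↔ pvIsML m = true := by
  unfold pvRank pvIsML pvGet
  split_ifs with h1
  · simp [h1]
  · simp [h1]; split <;> simp_all

lemma pvRank_of_skip (m : List (String × String)) (h1 : pvIsML m = false) (h2 : pvSkip m = true) :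
    pvRank m = 2 := by
  unfold pvIsML pvGet at h1
  unfold pvSkip pvGet at h2
  unfold pvRank
  simp only [h1] at *
  simp_all

lemma pvRank_of_plain (m : List (String × String)) (h1 : pvIsML m = false) (h2 : pvSkip m = false) :
    pvRank m = 1 := by
  unfold pvRank; unfold pvIsML pvGet at h1; unfold pvSkip pvGet at h2; simp_all

lemma pvRank_lt_three (m : List (String × String)) : pvRank m < 3 := by
  unfold pvRank
  split
  · omega
  · dsimp only
    split <;> omega

-- first market of rank exactly 1 / exactly 2 (proof-side characterisations of the fold)
def pvFirst1 : List (List (String × String)) → Option (List (String × String))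
  | [] => none
  | m :: t => if pvRank m = 1 then some m else pvFirst1 t

def pvFirst2 : List (List (String × String)) → Option (List (String × String))
  | [] => none
  | m :: t => if pvRank m = 2 then some m else pvFirst2 t

-- an incoming best only survives if nothing beats its rank; the improvements ignore it
lemma foldl_step_or (xs : List (List (String × String))) (acc : Option (List (String × String))) (r : Nat) :
    (xs.foldl pvStepB (acc, r)).1 = ((xs.foldl pvStepB (none, r)).1).or acc := by
  induction xs generalizing acc r with
  | nil => simp [Option.or]
  | cons m t ih =>
    by_cases h : pvRank m < r
    · simp only [List.foldl, pvStepB, h, if_pos]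
      rw [ih (some m) (pvRank m)]
      cases h2 : ((t.foldl pvStepB (none, pvRank m)).1) <;> simp [Option.or]
    · simp only [List.foldl, pvStepB, h, if_neg, not_false_iff]
      exact ih acc r

lemma foldl_bound_zero (xs : List (List (String × String))) (acc : Option (List (String × String))) :
    (xs.foldl pvStepB (acc, 0)).1 = acc := by
  induction xs generalizing acc with
  | nil => rfl
  | cons m t ih => simp only [List.foldl, pvStepB, Nat.not_lt_zero]; exact ih acc

lemma foldl_bound_one (xs : List (List (String × String))) :
    (xs.foldl pvStepB (none, 1)).1 = pvPass1 xs := by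
  induction xs with
  | nil => rfl
  | cons m t ih =>
    by_cases h : pvIsML m
    · have h0 : pvRank m = 0 := (pvRank_eq_zero_iff m).2 h
      simp only [List.foldl, pvStepB, h0, pvPass1, h, if_pos, Nat.zero_lt_one]
      exact foldl_bound_zero t (some m)
    · have h0 : pvRank m ≠ 0 := fun hc => h ((pvRank_eq_zero_iff m).1 hc)
      simp only [List.foldl, pvStepB, pvPass1, h]
      rw [if_neg (by omega), if_neg (by simp)]
      exact ih

lemma foldl_bound_two (xs : List (List (String × String))) :
    (xs.foldl pvStepB (none, 2)).1 = (pvPass1 xs).or (pvFirst1 xs) := by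
  induction xs with
  | nil => rfl
  | cons m t ih =>
    by_cases h : pvIsML m
    · have h0 : pvRank m = 0 := (pvRank_eq_zero_iff m).2 h
      simp only [List.foldl, pvStepB, h0, pvPass1, h, if_pos, Nat.zero_lt_two]
      rw [foldl_bound_zero t (some m)]; simp [Option.or]
    · have h0 : pvRank m ≠ 0 := fun hc => h ((pvRank_eq_zero_iff m).1 hc)
      by_cases hs : pvSkip m
      · have h2 : pvRank m = 2 := pvRank_of_skip m (by simp_all) hs
        simp only [List.foldl, pvStepB, h2, pvPass1, pvFirst1, h]
        rw [if_neg (by omega), if_neg (by simp), if_neg (by omega)]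
        exact ih
      · have h1 : pvRank m = 1 := pvRank_of_plain m (by simp_all) (by simp [hs])
        simp only [List.foldl, pvStepB, h1, pvPass1, pvFirst1, h]
        rw [if_pos (by omega), if_neg (by simp)]
        rw [foldl_step_or t (some m) 1, foldl_bound_one t]
        cases hp : pvPass1 t <;> simp [Option.or]

lemma foldl_bound_three (xs : List (List (String × String))) :
    (xs.foldl pvStepB (none, 3)).1 = (pvPass1 xs).or ((pvFirst1 xs).or (pvFirst2 xs)) := by
  induction xs with
  | nil => rfl
  | cons m t ih =>
    simp only [List.foldl, pvStepB]
    rw [if_pos (pvRank_lt_three m)]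
    rw [foldl_step_or t (some m) (pvRank m)]
    by_cases h : pvIsML m
    · have h0 : pvRank m = 0 := (pvRank_eq_zero_iff m).2 h
      rw [h0, foldl_bound_zero t none]
      simp [pvPass1, h, Option.or]
    · by_cases hs : pvSkip m
      · have h2 : pvRank m = 2 := pvRank_of_skip m (by simp_all) hs
        rw [h2, foldl_bound_two t]
        simp only [pvPass1, pvFirst1, pvFirst2, h, Bool.false_eq_true, if_false]
        rw [if_neg (by omega)]
        rw [if_pos h2]
        cases hp : pvPass1 t <;> cases h1 : pvFirst1 t <;> simp [Option.or]
      · have h1 : pvRank m = 1 := pvRank_of_plain m (by simp_all) (by simp [hs])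
        rw [h1, foldl_bound_one t]
        simp only [pvPass1, pvFirst1, h, Bool.false_eq_true, if_false]
        rw [if_pos h1]
        cases hp : pvPass1 t <;> simp [Option.or]

-- when the list has no moneyline market, the first rank-1 market is A's second-pass result
lemma first1_eq_pass2 (xs : List (List (String × String))) (h : pvPass1 xs = none) :
    pvFirst1 xs = pvPass2 xs := by
  induction xs with
  | nil => rfl
  | cons m t ih =>
    unfold pvPass1 at h
    by_cases hm : pvIsML m
    · simp [hm] at h
    · rw [if_neg (by simp [hm])] at h
      by_cases hs : pvSkip m
      · have h2 : pvRank m = 2 := pvRank_of_skip m (by simp [hm]) hs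
        simp only [pvFirst1, pvPass2, h2, hs, if_pos]
        rw [if_neg (by omega)]; exact ih h
      · have h1 : pvRank m = 1 := pvRank_of_plain m (by simp [hm]) (by simp [hs])
        simp [pvFirst1, pvPass2, h1, hs]

-- when both passes fail, every market has rank 2, so the first rank-2 market is the head
lemma first2_eq_head (xs : List (List (String × String))) (h1 : pvPass1 xs = none)
    (h2 : pvPass2 xs = none) : pvFirst2 xs = xs.head? := by
  cases xs with
  | nil => rfl
  | cons m t =>
    unfold pvPass1 at h1; unfold pvPass2 at h2
    by_cases hm : pvIsML m
    · simp [hm] at h1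
    · by_cases hs : pvSkip m
      · have hr : pvRank m = 2 := pvRank_of_skip m (by simp [hm]) hs
        simp [pvFirst2, hr]
      · simp [hs] at h2

-- ===== VERDICT =====
theorem find_moneyline_market_py_spec : Claim_equal_find_moneyline_market_py := by
  intro xs _
  unfold Spec_find_moneyline_market_py find_moneyline_market_py find_moneyline_market_py_alt
  rw [foldl_bound_three]
  cases h1 : pvPass1 xs with
  | some m => simp [Option.or]
  | none =>
    cases h2 : pvPass2 xs with
    | some m => rw [first1_eq_pass2 xs h1, h2]; simp [Option.or]
    | none =>
      rw [first1_eq_pass2 xs h1, h2, first2_eq_head xs h1 h2]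
      cases xs <;> simp [Option.or]
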